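-- pv_equiv track=rewrite | github.com/ajay-rs/PYTHON- | neonnumber.py | Neon_number
-- ===== SOURCE A (Python) =====
-- def  Neon_number(no):
--
--     no2=no*no
--     sum_of_digit=0
--     while no2>0:
--        digit=no2%10
--        sum_of_digit+=digit
--        no2//=10
--     return sum_of_digit
-- ===== SOURCE B (Python) =====
-- def Neon_number(no):
--     return sum(int(c) for c in str(no * no))
-- ===== Notes on version B (the rewrite author's own statement) =====
-- stated objective: idiomatic
-- what changed: B renders the square once as its decimal string and sums the digit characters, instead of A's arithmetic mod-and-div digit-peeling loop.
import Mathlib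
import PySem

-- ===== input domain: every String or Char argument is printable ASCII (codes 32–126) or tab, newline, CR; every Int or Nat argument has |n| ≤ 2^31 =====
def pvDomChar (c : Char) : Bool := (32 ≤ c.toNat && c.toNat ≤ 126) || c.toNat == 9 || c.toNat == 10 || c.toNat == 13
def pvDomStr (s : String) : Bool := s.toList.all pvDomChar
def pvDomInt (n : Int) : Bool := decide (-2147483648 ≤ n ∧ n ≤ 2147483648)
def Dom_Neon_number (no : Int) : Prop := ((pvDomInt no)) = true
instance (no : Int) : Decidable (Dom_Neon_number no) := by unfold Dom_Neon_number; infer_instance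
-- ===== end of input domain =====

-- B renders the square once as its decimal string and sums the digit characters,
-- instead of A's arithmetic mod-and-div digit-peeling loop (idiomatic; same cost).

-- ===== PORT A =====
-- the while loop: while no2>0: digit=no2%10; sum+=digit; no2//=10
def neonLoopA (no2 sum_of_digit : Int) : Int :=
  if no2 > 0 then
    neonLoopA (PySem.Int.floordiv no2 10) (sum_of_digit + PySem.Int.mod no2 10)
  else sum_of_digit
termination_by no2.toNat
decreasing_by
  rename_i h
  rw [PySem.Int.floordiv_eq_ediv_of_pos (by norm_num : (0:Int) < 10)]
  omega

def Neon_number (no : Int) : Int :=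
  neonLoopA (no * no) 0

-- ===== PORT B =====
-- sum(int(c) for c in str(no*no)); every char of str(no*no) is a decimal digit
-- (no*no ≥ 0), so int(c) is exactly (c.toNat - 48) there.
def Neon_number_alt (no : Int) : Int :=
  (PySem.Int.toStr (no * no)).toList.foldl (fun s c => s + ((c.toNat : Int) - 48)) 0

-- ===== PRECONDITION & SPEC =====
def Spec_Neon_number (no : Int) (out : Int) : Prop := out = Neon_number_alt no
instance (no : Int) (out : Int) : Decidable (Spec_Neon_number no out) := by unfold Spec_Neon_number; infer_instance

-- ===== CLAIM (what is proved, stated in full; the proofs are below) =====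
def Claim_equal_Neon_number : Prop := ∀ (no : Int), Dom_Neon_number no → Spec_Neon_number no (Neon_number no)

-- ===== LEMMAS AND PROOFS =====

-- digit sum of a natural number
def dsum (n : Nat) : Nat :=
  if n = 0 then 0 else n % 10 + dsum (n / 10)
decreasing_by exact Nat.div_lt_self (by omega) (by norm_num)

-- value of one decimal digit character
def cval (c : Char) : Int := (c.toNat : Int) - 48

def csum : List Char → Int
  | [] => 0
  | c :: t => cval c + csum t

theorem foldl_cval (l : List Char) (a : Int) :
    l.foldl (fun s c => s + ((c.toNat : Int) - 48)) a = a + csum l := by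
  induction l generalizing a with
  | nil => simp [csum]
  | cons c t ih => simp [List.foldl, csum, cval, ih]; ring

theorem cval_digitChar (r : Nat) (h : r < 10) : cval (Nat.digitChar r) = (r : Int) := by
  interval_cases r <;> decide

theorem csum_toDigitsCore (f : Nat) : ∀ (n : Nat) (l : List Char), n < f →
    csum (Nat.toDigitsCore 10 f n l) = (n % 10 : Nat) + (dsum (n / 10) : Nat) + csum l := by
  induction f with
  | zero => intro n l h; omega
  | succ f ih =>
    intro n l h
    rw [Nat.toDigitsCore]
    by_cases h0 : n / 10 = 0
    · rw [if_pos h0]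
      have hd0 : dsum 0 = 0 := by rw [dsum]; rfl
      simp only [csum, h0, hd0, cval_digitChar _ (Nat.mod_lt _ (by norm_num))]
      push_cast; ring
    · rw [if_neg h0]
      have hlt : n / 10 < f := by
        have : 10 ≤ n := by omega
        have := Nat.div_lt_self (show 0 < n by omega) (show 1 < 10 by norm_num)
        omega
      rw [ih (n / 10) _ hlt]
      simp only [csum, cval_digitChar _ (Nat.mod_lt _ (by norm_num))]
      rw [show dsum (n / 10) = (n / 10) % 10 + dsum (n / 10 / 10) by rw [dsum]; simp [h0]]
      push_cast
      ring

theorem csum_toDigits (m : Nat) : csum (Nat.toDigits 10 m) = (dsum m : Int) := by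
  unfold Nat.toDigits
  rw [csum_toDigitsCore (m + 1) m [] (by omega)]
  rw [show (dsum m : Int) = ((if m = 0 then 0 else m % 10 + dsum (m / 10) : Nat) : Int) by rw [dsum]]
  by_cases h : m = 0
  · simp [h, csum, dsum]
  · simp [h, csum]

theorem neonLoopA_eq (m : Nat) : ∀ (s : Int), neonLoopA (m : Int) s = s + (dsum m : Int) := by
  induction m using Nat.strong_induction_on with
  | _ m ih =>
    intro s
    rw [neonLoopA]
    by_cases h : (m : Int) > 0
    · have hm : m ≠ 0 := by omega
      rw [if_pos h,
          PySem.Int.floordiv_eq_ediv_of_pos (by norm_num : (0:Int) < 10),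
          PySem.Int.mod_eq_emod_of_pos (by norm_num : (0:Int) < 10)]
      have hdiv : (m : Int) / 10 = ((m / 10 : Nat) : Int) := by omega
      have hmod : (m : Int) % 10 = ((m % 10 : Nat) : Int) := by omega
      rw [hdiv, hmod, ih (m / 10) (Nat.div_lt_self (by omega) (by norm_num)) _]
      rw [show dsum m = m % 10 + dsum (m / 10) by rw [dsum]; simp [hm]]
      push_cast; ring
    · have hm : m = 0 := by omega
      have hd0 : dsum 0 = 0 := by rw [dsum]; rfl
      simp [hm, hd0]

-- ===== VERDICT (by name: the statement is the Claim_ definition above) =====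
theorem Neon_number_spec : Claim_equal_Neon_number := by
  intro no _
  unfold Spec_Neon_number Neon_number Neon_number_alt
  have hnn : (0 : Int) ≤ no * no := mul_self_nonneg no
  rw [PySem.Int.toList_toStr, PySem.Int.toChars,
      if_neg (show ¬ no * no < 0 by omega), foldl_cval, csum_toDigits,
      show no * no = (((no * no).toNat : Nat) : Int) from by omega,
      neonLoopA_eq, Int.toNat_natCast]
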